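-- pv_equiv track=rewrite | github.com/LaMemeBete/TP-INFORMATIQUE | tp-4.py | nombre_couples_divise_rapide
-- ===== SOURCE A (Python) =====
-- def nombre_couples_divise_rapide(n, p):
--     nombre = 0;
--     indexInt = n
--     foundCouple = False;
--     while indexInt < p:
--         currentPlace = indexInt+1
--         while currentPlace <= p:
--             nombre +=1;
--             if(indexInt != 0):
--                 if(currentPlace%indexInt == 0):
--                     return nombre;
--             currentPlace += 1;
--         indexInt += 1
--     return nombre
-- ===== SOURCE B (Python) =====
-- def nombre_couples_divise_rapide(n, p):
--     # Closed-form case analysis: the scan stops at the first multiple of the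
--     # current row index when one exists in range, otherwise it counts the
--     # full triangle.
--     if n >= p:
--         return 0
--     if n == 0:
--         return p + 1 if p >= 2 else 1
--     if n > 0:
--         return n if 2 * n <= p else (p - n) * (p - n + 1) // 2
--     # n < 0
--     return -n if p >= 0 else (p - n) * (p - n + 1) // 2
-- ===== Notes on version B (the rewrite author's own statement) =====
-- stated objective: alternative
-- what changed: Replaced the nested while-loop scan by a constant-time closed-form case analysis: the scan stops at the first multiple of the current row index when one exists in range, and otherwise counts the full triangle (p-n)(p-n+1)/2.
import Mathlib
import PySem

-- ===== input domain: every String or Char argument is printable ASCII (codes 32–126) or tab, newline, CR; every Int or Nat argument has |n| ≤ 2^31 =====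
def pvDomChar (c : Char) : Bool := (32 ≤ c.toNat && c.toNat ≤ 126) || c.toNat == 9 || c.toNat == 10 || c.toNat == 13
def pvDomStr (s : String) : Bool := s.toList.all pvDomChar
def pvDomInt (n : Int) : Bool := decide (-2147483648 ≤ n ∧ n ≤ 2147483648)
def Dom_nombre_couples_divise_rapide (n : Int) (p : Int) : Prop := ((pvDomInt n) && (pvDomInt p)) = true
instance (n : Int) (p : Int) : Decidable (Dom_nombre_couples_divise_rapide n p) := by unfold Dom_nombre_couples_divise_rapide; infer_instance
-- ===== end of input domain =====

-- B replaces A's nested while-loop scan with an O(1) closed-form case analysis.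


-- ===== PORT A =====
-- inner 'while currentPlace <= p': returns .inl nombre on the early 'return nombre',
-- .inr nombre when the inner loop finishes normally.
def pvInnerA (nombre indexInt currentPlace p : Int) : Int ⊕ Int :=
  if currentPlace ≤ p then
    let nombre := nombre + 1
    if indexInt ≠ 0 ∧ PySem.Int.mod currentPlace indexInt = 0 then Sum.inl nombre
    else pvInnerA nombre indexInt (currentPlace + 1) p
  else Sum.inr nombre
  termination_by (p + 1 - currentPlace).toNat
  decreasing_by omega

-- outer 'while indexInt < p'
def pvOuterA (nombre indexInt p : Int) : Int :=
  if indexInt < p then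
    match pvInnerA nombre indexInt (indexInt + 1) p with
    | Sum.inl r => r
    | Sum.inr nombre' => pvOuterA nombre' (indexInt + 1) p
  else nombre
  termination_by (p - indexInt).toNat
  decreasing_by omega

def nombre_couples_divise_rapide (n : Int) (p : Int) : Int := pvOuterA 0 n p

-- ===== PORT B =====
def nombre_couples_divise_rapide_alt (n : Int) (p : Int) : Int :=
  if n ≥ p then 0
  else if n = 0 then (if p ≥ 2 then p + 1 else 1)
  else if n > 0 then
    (if 2 * n ≤ p then n else PySem.Int.floordiv ((p - n) * (p - n + 1)) 2)
  else
    (if p ≥ 0 then -n else PySem.Int.floordiv ((p - n) * (p - n + 1)) 2)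

-- ===== PRECONDITION & SPEC =====
def Spec_nombre_couples_divise_rapide (n : Int) (p : Int) (out : Int) : Prop := out = nombre_couples_divise_rapide_alt n p
instance (n : Int) (p : Int) (out : Int) : Decidable (Spec_nombre_couples_divise_rapide n p out) := by unfold Spec_nombre_couples_divise_rapide; infer_instance

-- ===== CLAIM (what is proved, stated in full; the proofs are below) =====
def Claim_equal_nombre_couples_divise_rapide : Prop := ∀ (n : Int) (p : Int), Dom_nombre_couples_divise_rapide n p → Spec_nombre_couples_divise_rapide n p (nombre_couples_divise_rapide n p)

-- ===== LEMMAS AND PROOFS =====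

-- inner loop reaches the end of the row when the early-return guard never fires
theorem pvInnerA_nofind (i p : Int) :
    ∀ (k : Nat) (nombre c : Int), c ≤ p + 1 → (p + 1 - c).toNat = k →
      (∀ m, c ≤ m → m ≤ p → ¬ (i ≠ 0 ∧ i ∣ m)) →
      pvInnerA nombre i c p = Sum.inr (nombre + (p + 1 - c)) := by
  intro k
  induction k with
  | zero =>
    intro nombre c hc hk hnd
    unfold pvInnerA
    rw [if_neg (by omega)]
    congr 1; omega
  | succ k ih =>
    intro nombre c hc hk hnd
    have hcp : c ≤ p := by omega
    unfold pvInnerA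
    rw [if_pos hcp, if_neg ?_]
    · rw [ih (nombre + 1) (c + 1) (by omega) (by omega)
        (fun m h1 h2 => hnd m (by omega) h2)]
      congr 1; omega
    · rintro ⟨hi, hm⟩
      exact hnd c le_rfl hcp ⟨hi, (PySem.Int.mod_eq_zero_iff_dvd c i).mp hm⟩

-- inner loop returns early at the least multiple m of i in [c, p]
theorem pvInnerA_find (i p : Int) (hi : i ≠ 0) :
    ∀ (k : Nat) (nombre c m : Int), c ≤ m → m ≤ p → i ∣ m →
      (∀ m', c ≤ m' → m' < m → ¬ i ∣ m') → (m - c).toNat = k →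
      pvInnerA nombre i c p = Sum.inl (nombre + (m - c + 1)) := by
  intro k
  induction k with
  | zero =>
    intro nombre c m hcm hmp hdvd hmin hk
    have hm : m = c := by omega
    subst hm
    unfold pvInnerA
    rw [if_pos (by omega), if_pos ⟨hi, (PySem.Int.mod_eq_zero_iff_dvd m i).mpr hdvd⟩]
    congr 1; omega
  | succ k ih =>
    intro nombre c m hcm hmp hdvd hmin hk
    have hcm' : c < m := by omega
    unfold pvInnerA
    rw [if_pos (by omega), if_neg ?_]
    · rw [ih (nombre + 1) (c + 1) m (by omega) hmp hdvd
        (fun m' h1 h2 => hmin m' (by omega) h2) (by omega)]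
      congr 1; omega
    · rintro ⟨-, hm⟩
      exact hmin c le_rfl hcm' ((PySem.Int.mod_eq_zero_iff_dvd c i).mp hm)

theorem pv_fd_step (d : Int) (_hd : 1 ≤ d) :
    PySem.Int.floordiv (d * (d + 1)) 2 = d + PySem.Int.floordiv ((d - 1) * d) 2 := by
  rw [PySem.Int.floordiv_eq_ediv_of_pos (by omega),
      PySem.Int.floordiv_eq_ediv_of_pos (by omega)]
  have h : d * (d + 1) = (d - 1) * d + d * 2 := by ring
  rw [h, Int.add_mul_ediv_right _ _ (by omega : (2:Int) ≠ 0)]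
  ring

-- when no row ever returns early, the outer loop counts the full triangle
theorem pvOuterA_tri (p : Int) :
    ∀ (k : Nat) (nombre n : Int), n ≤ p → (p - n).toNat = k →
      (∀ i m, n ≤ i → i < p → i + 1 ≤ m → m ≤ p → ¬ (i ≠ 0 ∧ i ∣ m)) →
      pvOuterA nombre n p = nombre + PySem.Int.floordiv ((p - n) * (p - n + 1)) 2 := by
  intro k
  induction k with
  | zero =>
    intro nombre n hnp hk hnd
    have hn : n = p := by omega
    subst hn
    unfold pvOuterA
    rw [if_neg (by omega)]
    norm_num [PySem.Int.floordiv_eq_ediv_of_pos (by omega : (0:Int) < 2)]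
  | succ k ih =>
    intro nombre n hnp hk hnd
    have hlt : n < p := by omega
    unfold pvOuterA
    rw [if_pos hlt,
        pvInnerA_nofind n p (p - n).toNat nombre (n + 1) (by omega) (by omega)
          (fun m h1 h2 => hnd n m le_rfl hlt h1 h2)]
    dsimp only
    rw [ih (nombre + (p + 1 - (n + 1))) (n + 1) (by omega) (by omega)
        (fun i m h1 h2 h3 h4 => hnd i m (by omega) h2 h3 h4)]
    have := pv_fd_step (p - n) (by omega)
    have harg : (p - (n + 1)) * (p - (n + 1) + 1) = (p - n - 1) * (p - n) := by ring
    rw [harg]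
    omega

-- a positive i has no multiple strictly between i and 2*i
theorem pv_no_mult_pos (i m : Int) (hi : 0 < i) (h1 : i < m) (h2 : m < 2 * i) : ¬ i ∣ m := by
  rintro ⟨q, rfl⟩
  rcases Int.lt_or_le q 2 with hq | hq
  · have hq1 : q ≤ 1 := by omega
    nlinarith
  · nlinarith

-- a negative i has no multiple strictly between i and 0
theorem pv_no_mult_neg (i m : Int) (hi : i < 0) (h1 : i < m) (h2 : m < 0) : ¬ i ∣ m := by
  rintro ⟨q, rfl⟩
  by_cases hq : q ≤ 0
  · nlinarith
  · have hq1 : 1 ≤ q := by omega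
    nlinarith

-- ===== VERDICT (by name: the statement is the Claim_ definition above) =====
theorem nombre_couples_divise_rapide_spec : Claim_equal_nombre_couples_divise_rapide := by
  intro n p _
  unfold Spec_nombre_couples_divise_rapide nombre_couples_divise_rapide
    nombre_couples_divise_rapide_alt
  by_cases hge : n ≥ p
  · rw [if_pos hge]
    unfold pvOuterA
    rw [if_neg (by omega)]
  rw [if_neg hge]
  by_cases h0 : n = 0
  · subst h0
    rw [if_pos rfl]
    have hp1 : 1 ≤ p := by omega
    unfold pvOuterA
    rw [if_pos (by omega),
        pvInnerA_nofind 0 p p.toNat 0 (0 + 1) (by omega) (by omega)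
          (fun m _ _ h => h.1 rfl)]
    dsimp only
    by_cases hp2 : p ≥ 2
    · rw [if_pos hp2]
      unfold pvOuterA
      rw [if_pos (by omega),
          pvInnerA_find (0 + 1) p one_ne_zero 0 (0 + (p + 1 - (0 + 1))) (0 + 1 + 1) 2
            (by omega) (by omega) ⟨2, by ring⟩ (fun m' h1 h2 => absurd h2 (by omega))
            (by omega)]
      dsimp only
      omega
    · rw [if_neg hp2]
      have hp : p = 1 := by omega
      unfold pvOuterA
      rw [if_neg (by omega)]
      omega
  rw [if_neg h0]
  by_cases hpos : n > 0
  · rw [if_pos hpos]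
    by_cases h2n : 2 * n ≤ p
    · rw [if_pos h2n]
      unfold pvOuterA
      rw [if_pos (by omega),
          pvInnerA_find n p h0 (2 * n - (n + 1)).toNat 0 (n + 1) (2 * n) (by omega) h2n ⟨2, by ring⟩
            (fun m' ha hb => pv_no_mult_pos n m' hpos (by omega) hb) (by omega)]
      dsimp only
      omega
    · rw [if_neg h2n]
      rw [pvOuterA_tri p (p - n).toNat 0 n (by omega) rfl ?_]
      · omega
      · rintro i m hni hip him hmp ⟨hi, hdvd⟩
        exact pv_no_mult_pos i m (by omega) (by omega) (by omega) hdvd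
  · rw [if_neg hpos]
    have hneg : n < 0 := by omega
    by_cases hp0 : p ≥ 0
    · rw [if_pos hp0]
      unfold pvOuterA
      rw [if_pos (by omega),
          pvInnerA_find n p h0 (0 - (n + 1)).toNat 0 (n + 1) 0 (by omega) hp0
            ⟨0, by ring⟩ (fun m' ha hb => pv_no_mult_neg n m' hneg (by omega) hb)
            (by omega)]
      dsimp only
      omega
    · rw [if_neg hp0]
      rw [pvOuterA_tri p (p - n).toNat 0 n (by omega) rfl ?_]
      · omega
      · rintro i m hni hip him hmp ⟨hi, hdvd⟩
        exact pv_no_mult_neg i m (by omega) (by omega) (by omega) hdvd
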